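-- pv_equiv track=rewrite | github.com/j-greig/wibandwob-dos-tvision | scratch/contour_map.py | march
-- ===== SOURCE A (Python) =====
-- MS = [
--     ' ',  # 0000  no contour
--     '╮',  # 0001  left + bottom
--     '╭',  # 0010  right + bottom
--     '─',  # 0011  left + right
--     '╰',  # 0100  right + top
--     '╮',  # 0101  saddle (approx)
--     '│',  # 0110  top + bottom
--     '╯',  # 0111  left + top
--     '╯',  # 1000  left + top
--     '│',  # 1001  top + bottom
--     '╭',  # 1010  saddle (approx)
--     '╰',  # 1011  right + top
--     '─',  # 1100  left + right
--     '╭',  # 1101  right + bottom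
--     '╮',  # 1110  left + bottom
--     ' ',  # 1111  no contour
-- ]
--
-- def march(grid, h, w, threshold):
--     """Marching squares at one threshold. Returns 2D char array (h-1 x w-1)."""
--     rows = []
--     for y in range(h - 1):
--         row = []
--         for x in range(w - 1):
--             tl = 1 if grid[y][x] >= threshold else 0
--             tr = 1 if grid[y][x + 1] >= threshold else 0
--             br = 1 if grid[y + 1][x + 1] >= threshold else 0
--             bl = 1 if grid[y + 1][x] >= threshold else 0
--             idx = (tl << 3) | (tr << 2) | (br << 1) | bl
--             row.append(MS[idx])
--         rows.append(row)
--     return rows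
-- ===== SOURCE B (Python) =====
-- def _cell(tl, tr, br, bl):
--     """Classify the square by which of its edges the contour crosses."""
--     left, right = tl != bl, tr != br
--     up, down = tl != tr, bl != br
--     if left and right and up and down:     # saddle: disambiguate by top-left corner
--         return '\u256d' if tl else '\u256e'
--     if left and down:
--         return '\u256e'
--     if right and down:
--         return '\u256d'
--     if left and right:
--         return '\u2500'
--     if right and up:
--         return '\u2570'
--     if up and down:
--         return '\u2502'
--     if left and up:
--         return '\u256f'
--     return ' '
--
--
-- def march(grid, h, w, threshold):
--     """Marching squares via edge-crossing classification: threshold the grid,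
--     then zip adjacent row pairs and adjacent column pairs; no lookup table."""
--     if h < 2 or w < 2:
--         return [[] for _ in range(max(h - 1, 0))]
--     rows = [[v >= threshold for v in r[:w]] for r in grid[:h]]
--     return [[_cell(tl, tr, br, bl)
--              for (tl, bl), (tr, br) in zip(zip(top, bot), zip(top[1:], bot[1:]))]
--             for top, bot in zip(rows, rows[1:])]
-- ===== Notes on version B (the rewrite author's own statement) =====
-- stated objective: alternative
-- what changed: B drops A's 16-entry lookup table and bit-packing entirely: it thresholds the grid once, zips adjacent row and column pairs, and picks each character by a decision tree over which square edges the contour crosses (corner inequalities), instead of A's index-loop that packs four comparisons into a table index.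
import Mathlib
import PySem

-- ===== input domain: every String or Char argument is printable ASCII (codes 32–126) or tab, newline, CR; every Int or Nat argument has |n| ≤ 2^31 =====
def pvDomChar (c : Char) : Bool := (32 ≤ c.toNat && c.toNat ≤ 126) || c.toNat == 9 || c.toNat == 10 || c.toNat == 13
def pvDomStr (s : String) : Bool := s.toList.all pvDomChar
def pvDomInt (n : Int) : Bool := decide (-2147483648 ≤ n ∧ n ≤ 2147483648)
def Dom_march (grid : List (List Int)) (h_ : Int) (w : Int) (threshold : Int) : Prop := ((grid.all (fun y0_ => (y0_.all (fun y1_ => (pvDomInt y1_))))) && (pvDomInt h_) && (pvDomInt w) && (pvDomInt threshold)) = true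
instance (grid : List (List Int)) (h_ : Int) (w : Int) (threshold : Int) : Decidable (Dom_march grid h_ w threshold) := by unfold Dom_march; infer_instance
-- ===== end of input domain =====

-- B replaces A's bit-packed table lookup by an edge-crossing decision tree over zipped
-- adjacent row/column pairs; equivalence is proved on Pre_ (the inputs where A does not raise).

-- ===== PORT A =====
def MS : List String :=
  [" ", "╮", "╭", "─", "╰", "╮", "│", "╯", "╯", "│", "╭", "╰", "─", "╭", "╮", " "]

def march (grid : List (List Int)) (h_ : Int) (w : Int) (threshold : Int) : List (List String) :=
  (PySem.List.pyRange 0 (h_ - 1) 1).map (fun y =>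
    (PySem.List.pyRange 0 (w - 1) 1).map (fun x =>
      let tl : Nat := if PySem.List.pyGetD (PySem.List.pyGetD grid y []) x 0 ≥ threshold then 1 else 0
      let tr : Nat := if PySem.List.pyGetD (PySem.List.pyGetD grid y []) (x + 1) 0 ≥ threshold then 1 else 0
      let br : Nat := if PySem.List.pyGetD (PySem.List.pyGetD grid (y + 1) []) (x + 1) 0 ≥ threshold then 1 else 0
      let bl : Nat := if PySem.List.pyGetD (PySem.List.pyGetD grid (y + 1) []) x 0 ≥ threshold then 1 else 0
      let idx : Nat := (tl <<< 3) ||| (tr <<< 2) ||| (br <<< 1) ||| bl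
      PySem.List.pyGetD MS (idx : Int) " "))

-- ===== PORT B =====
def cellChar (tl tr br bl : Bool) : String :=
  let left := tl != bl
  let right := tr != br
  let up := tl != tr
  let down := bl != br
  if left && right && up && down then (if tl then "╭" else "╮")
  else if left && down then "╮"
  else if right && down then "╭"
  else if left && right then "─"
  else if right && up then "╰"
  else if up && down then "│"
  else if left && up then "╯"
  else " "

def march_alt (grid : List (List Int)) (h_ : Int) (w : Int) (threshold : Int) : List (List String) :=
  if h_ < 2 ∨ w < 2 then (PySem.List.pyRange 0 (max (h_ - 1) 0) 1).map (fun _ => ([] : List String))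
  else
    let rows : List (List Bool) :=
      (PySem.List.slice grid none (some h_)).map (fun r =>
        (PySem.List.slice r none (some w)).map (fun v => decide (v ≥ threshold)))
    (rows.zip (PySem.List.slice rows (some 1) none)).map (fun tb =>
      ((tb.1.zip tb.2).zip ((PySem.List.slice tb.1 (some 1) none).zip (PySem.List.slice tb.2 (some 1) none))).map
        (fun p => cellChar p.1.1 p.2.1 p.2.2 p.1.2))

-- ===== PRECONDITION & SPEC =====
-- Pre_ excludes exactly the inputs where A raises IndexError: when h ≥ 2 and w ≥ 2, A
-- reads grid[y][x] for all y < h, x < w, so grid needs at least h rows of length ≥ w.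
def Pre_march (grid : List (List Int)) (h_ : Int) (w : Int) (threshold : Int) : Prop :=
  (2 ≤ h_ ∧ 2 ≤ w) → (h_ ≤ (grid.length : Int) ∧ ∀ row ∈ grid.take h_.toNat, w ≤ (row.length : Int))
instance (grid : List (List Int)) (h_ : Int) (w : Int) (threshold : Int) : Decidable (Pre_march grid h_ w threshold) := by unfold Pre_march; infer_instance

def pvWitness_march : List (List Int) × Int × Int × Int := ([[0, 2], [2, 0]], 2, 2, 1)

def Spec_march (grid : List (List Int)) (h_ : Int) (w : Int) (threshold : Int) (out : List (List String)) : Prop := out = march_alt grid h_ w threshold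
instance (grid : List (List Int)) (h_ : Int) (w : Int) (threshold : Int) (out : List (List String)) : Decidable (Spec_march grid h_ w threshold out) := by unfold Spec_march; infer_instance

-- ===== CLAIM (what is proved, stated in full; the proofs are below) =====
def Claim_equal_march : Prop := ∀ (grid : List (List Int)) (h_ : Int) (w : Int) (threshold : Int), Dom_march grid h_ w threshold → Pre_march grid h_ w threshold → Spec_march grid h_ w threshold (march grid h_ w threshold)

-- ===== LEMMAS AND PROOFS =====

-- A's table lookup agrees with B's edge-crossing decision tree on all 16 corner patterns.
lemma table_eq_cell (tl tr br bl : Bool) :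
    MS.getD ((tl.toNat <<< 3) ||| (tr.toNat <<< 2) ||| (br.toNat <<< 1) ||| bl.toNat) " "
      = cellChar tl tr br bl := by
  cases tl <;> cases tr <;> cases br <;> cases bl <;> decide

lemma ite_toNat (c : Prop) [Decidable c] :
    (if c then (1:Nat) else 0) = (decide c).toNat := by
  by_cases h : c <;> simp [h]

-- ===== VERDICT (by name: the statement is the Claim_ definition above) =====
theorem march_spec : Claim_equal_march := by
  intro grid h_ w threshold _ hpre
  unfold Spec_march march march_alt
  by_cases hdeg : h_ < 2 ∨ w < 2
  · rw [if_pos hdeg]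
    apply List.ext_getElem
    · rcases hdeg with hh | hw
      · simp [PySem.List.length_pyRange_one]; omega
      · simp [PySem.List.length_pyRange_one]; omega
    · intro i h1 h2
      rcases hdeg with hh | hw
      · exfalso; simp [PySem.List.length_pyRange_one] at h1; omega
      · simp [PySem.List.pyRange_one_eq_nil (show (w:Int) - 1 ≤ 0 from by omega)]
  · rw [if_neg hdeg]
    obtain ⟨hlen, hrow⟩ := hpre ⟨by omega, by omega⟩
    obtain ⟨hn, rfl⟩ := Int.eq_ofNat_of_zero_le (show (0:Int) ≤ h_ from by omega)
    obtain ⟨wn, rfl⟩ := Int.eq_ofNat_of_zero_le (show (0:Int) ≤ w from by omega)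
    have hn2 : 2 ≤ hn := by omega
    have wn2 : 2 ≤ wn := by omega
    have hglen : hn ≤ grid.length := by omega
    have hrowlen : ∀ (y : Nat), y < hn → wn ≤ (grid.getD y []).length := by
      intro y hy
      have hyg : y < grid.length := by omega
      have hm : (List.take (↑hn : Int).toNat grid)[y]'(by simp [List.length_take]; omega)
          ∈ List.take (↑hn : Int).toNat grid := List.getElem_mem _
      have h2 := hrow _ hm
      rw [List.getElem_take] at h2
      rw [List.getD_eq_getElem grid [] hyg]
      exact_mod_cast h2
    dsimp only
    simp only [PySem.List.slice_to_natCast, PySem.List.slice_from_one]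
    apply List.ext_getElem
    · simp [PySem.List.length_pyRange_one, List.length_take]
      omega
    · intro y hy1 hy2
      have hyn : y < hn - 1 := by
        simp only [PySem.List.length_pyRange_one, List.length_map] at hy1; omega
      simp only [PySem.List.pyRange_one, List.getElem_map, List.getElem_range,
        List.getElem_zip, List.getElem_tail, List.getElem_take]
      apply List.ext_getElem
      · have h1 := hrowlen y (by omega)
        have h2 := hrowlen (y+1) (by omega)
        rw [List.getD_eq_getElem grid [] (by omega : y < grid.length)] at h1
        rw [List.getD_eq_getElem grid [] (by omega : y+1 < grid.length)] at h2
        simp [List.length_take]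
        omega
      · intro x hx1 hx2
        have hxw : x < wn - 1 := by
          simp only [List.length_map, List.length_range] at hx1; omega
        have hwy := hrowlen y (by omega)
        have hwy1 := hrowlen (y+1) (by omega)
        rw [List.getD_eq_getElem grid [] (by omega : y < grid.length)] at hwy
        rw [List.getD_eq_getElem grid [] (by omega : y+1 < grid.length)] at hwy1
        simp only [List.getElem_map, List.getElem_range, List.getElem_zip,
          List.getElem_tail, List.getElem_take, zero_add]
        have c1 : ((y : Nat) : Int) + 1 = (((y+1 : Nat) : Nat) : Int) := by push_cast; ring
        have c2 : ((x : Nat) : Int) + 1 = (((x+1 : Nat) : Nat) : Int) := by push_cast; ring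
        rw [c1, c2]
        simp only [PySem.List.pyGetD_natCast]
        rw [List.getD_eq_getElem grid [] (by omega : y < grid.length),
          List.getD_eq_getElem grid [] (by omega : y+1 < grid.length)]
        rw [List.getD_eq_getElem (grid[y]) 0 (by omega : x < (grid[y]).length),
          List.getD_eq_getElem (grid[y]) 0 (by omega : x+1 < (grid[y]).length),
          List.getD_eq_getElem (grid[y+1]) 0 (by omega : x < (grid[y+1]).length),
          List.getD_eq_getElem (grid[y+1]) 0 (by omega : x+1 < (grid[y+1]).length)]
        rw [ite_toNat, ite_toNat, ite_toNat, ite_toNat]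
        exact table_eq_cell _ _ _ _
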